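-- pv_equiv track=rewrite | github.com/Programator2/medusa-policy-mining | generalize/runs.py | _get_numeric_regexp
-- ===== SOURCE A (Python) =====
-- def _get_numeric_regexp(name: str) -> str:
--     """Replace strings of numeric characters in `name` by unlimited number of
--     decimal regexp characters.
--     """
--     ret = ''
--     in_number = False
--     try:
--         for l in name:
--             if l.isnumeric():
--                 in_number = True
--                 continue
--             if in_number:
--                 ret += r'\d*'
--                 in_number = False
--             ret += l
--     except AttributeError:
--         breakpoint()
--     if in_number:
--         ret += r'\d*'
--     return ret
-- ===== SOURCE B (Python) =====
-- from itertools import groupby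
--
--
-- def _get_numeric_regexp(name: str) -> str:
--     return ''.join(r'\d*' if numeric else ''.join(group)
--                    for numeric, group in groupby(name, str.isnumeric))
-- ===== Notes on version B (the rewrite author's own statement) =====
-- stated objective: idiomatic
-- what changed: Replaces the manual char-by-char state machine (ret string accumulator plus in_number flag) with itertools.groupby partitioning the string into maximal same-class runs, emitting \d* or the run verbatim per group and joining once.
import Mathlib
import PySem

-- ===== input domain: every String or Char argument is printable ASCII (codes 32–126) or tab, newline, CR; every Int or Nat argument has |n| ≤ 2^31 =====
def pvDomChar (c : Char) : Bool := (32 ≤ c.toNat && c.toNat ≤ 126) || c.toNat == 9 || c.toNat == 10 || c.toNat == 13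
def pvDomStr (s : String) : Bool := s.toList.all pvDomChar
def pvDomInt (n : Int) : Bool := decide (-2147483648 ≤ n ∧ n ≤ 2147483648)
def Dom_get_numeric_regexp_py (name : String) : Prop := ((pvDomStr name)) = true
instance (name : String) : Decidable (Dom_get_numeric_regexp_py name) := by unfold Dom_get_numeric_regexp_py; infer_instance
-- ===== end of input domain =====

-- B replaces A's char-by-char state machine (in_number flag) with a groupby-style
-- decomposition into maximal same-class runs (idiomatic; same value everywhere).

-- ===== PORT A =====
-- A's loop: for l in name, with state (ret, in_number); Char.isDigit is exact for
-- str.isnumeric on the ASCII domain Dom. The string accumulator is kept as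
-- List Char and wrapped by String.mk at the end.
def getNumAuxA : List Char → List Char → Bool → List Char
  | [], ret, inn => if inn then ret ++ ['\\', 'd', '*'] else ret
  | c :: cs, ret, inn =>
    if c.isDigit then getNumAuxA cs ret true
    else getNumAuxA cs ((if inn then ret ++ ['\\', 'd', '*'] else ret) ++ [c]) false

def get_numeric_regexp_py (name : String) : String :=
  String.mk (getNumAuxA name.toList [] false)

-- ===== PORT B =====
-- Source B's groupby: each step consumes one maximal run of same numeric-class
-- characters and emits '\d*' for a numeric run, the run itself verbatim otherwise.
def runsB : List Char → List Char
  | [] => []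
  | c :: cs =>
    if c.isDigit then
      ['\\', 'd', '*'] ++ runsB (cs.dropWhile Char.isDigit)
    else
      (c :: cs.takeWhile (fun x => !x.isDigit)) ++ runsB (cs.dropWhile (fun x => !x.isDigit))
  termination_by l => l.length
  decreasing_by
  · exact Nat.lt_succ_of_le (List.length_dropWhile_le _ _)
  · exact Nat.lt_succ_of_le (List.length_dropWhile_le _ _)

def get_numeric_regexp_py_alt (name : String) : String :=
  String.mk (runsB name.toList)

-- ===== PRECONDITION & SPEC =====
def Spec_get_numeric_regexp_py (name : String) (out : String) : Prop := out = get_numeric_regexp_py_alt name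
instance (name : String) (out : String) : Decidable (Spec_get_numeric_regexp_py name out) := by unfold Spec_get_numeric_regexp_py; infer_instance

-- ===== CLAIM (what is proved, stated in full; the proofs are below) =====
def Claim_equal_get_numeric_regexp_py : Prop := ∀ (name : String), Dom_get_numeric_regexp_py name → Spec_get_numeric_regexp_py name (get_numeric_regexp_py name)

-- ===== LEMMAS AND PROOFS =====

-- A's loop only ever appends to its accumulator.
theorem getNumAuxA_acc (l : List Char) : ∀ (ret : List Char) (inn : Bool),
    getNumAuxA l ret inn = ret ++ getNumAuxA l [] inn := by
  induction l with
  | nil => intro ret inn; cases inn <;> simp [getNumAuxA]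
  | cons c cs ih =>
    intro ret inn
    by_cases h : c.isDigit
    · simp [getNumAuxA, h, ih ret]
    · cases inn
      · rw [getNumAuxA, getNumAuxA]
        simp only [if_neg h, Bool.false_eq_true, if_false]
        rw [ih (ret ++ [c]), ih ([] ++ [c])]; simp
      · rw [getNumAuxA, getNumAuxA]
        simp only [if_neg h, if_true]
        rw [ih ((ret ++ ['\\', 'd', '*']) ++ [c]), ih (([] ++ ['\\', 'd', '*']) ++ [c])]
        simp

-- Prepending a non-digit character to B's input just prepends it to B's output.
theorem runsB_cons_nondigit (c : Char) (cs : List Char) (h : c.isDigit = false) :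
    runsB (c :: cs) = c :: runsB cs := by
  rw [runsB]
  simp only [h]
  cases cs with
  | nil => simp [runsB]
  | cons d ds =>
    by_cases hd : d.isDigit
    · simp [List.takeWhile, List.dropWhile, hd]
    · conv_rhs => rw [runsB]
      simp [List.takeWhile, List.dropWhile, hd]

-- Prepending a digit to a digit-headed rest is absorbed into the same run.
theorem runsB_cons_digit (c : Char) (cs : List Char) (h : c.isDigit = true) :
    runsB (c :: cs) = '\\' :: 'd' :: '*' :: runsB (cs.dropWhile Char.isDigit) := by
  rw [runsB]; simp [h]

-- The state machine with empty accumulator equals the run decomposition: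
-- flag false ↦ runsB l; flag true ↦ '\d*' then runsB of l with its leading digits dropped.
theorem auxA_eq_runsB (l : List Char) :
    getNumAuxA l [] false = runsB l ∧
    getNumAuxA l [] true = '\\' :: 'd' :: '*' :: runsB (l.dropWhile Char.isDigit) := by
  induction l with
  | nil => simp [getNumAuxA, runsB]
  | cons c cs ih =>
    by_cases h : c.isDigit
    · constructor
      · rw [getNumAuxA]; simp only [h, if_true]
        rw [ih.2, runsB_cons_digit c cs h]
      · rw [getNumAuxA]; simp only [h, if_true]
        rw [ih.2]; simp [List.dropWhile, h]
    · have h' : c.isDigit = false := by simpa using h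
      constructor
      · rw [getNumAuxA]; simp only [h', Bool.false_eq_true, if_false]
        rw [getNumAuxA_acc, ih.1, runsB_cons_nondigit c cs h']
        simp
      · rw [getNumAuxA]; simp only [h', Bool.false_eq_true, if_false, if_true]
        rw [getNumAuxA_acc, ih.1, List.dropWhile, h']
        simp [runsB_cons_nondigit c cs h']

-- ===== VERDICT (by name: the statement is the Claim_ definition above) =====
theorem get_numeric_regexp_py_spec : Claim_equal_get_numeric_regexp_py := by
  intro name _
  unfold Spec_get_numeric_regexp_py get_numeric_regexp_py get_numeric_regexp_py_alt
  rw [(auxA_eq_runsB name.toList).1]
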